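-- pv_equiv track=rewrite | github.com/kschwethelm/looped-lm-scaling | scripts/prepack.py | _pack_row
-- ===== SOURCE A (Python) =====
-- def _pack_row(doc_buffer: list[list[int]], row_capacity: int) -> list[int] | None:
--     """
--     Pack a single row using best-fit algorithm.
--
--     For each position: find the largest doc that fits entirely, repeat until
--     nothing fits, then crop the shortest doc to fill remaining space.
--
--     Returns None if the buffer runs dry before the row is full.
--     """
--     row: list[int] = []
--     pos = 0
--     while pos < row_capacity and doc_buffer:
--         remaining = row_capacity - pos
--
--         best_idx = -1
--         best_len = 0
--         for i, doc in enumerate(doc_buffer):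
--             doc_len = len(doc)
--             if doc_len <= remaining and doc_len > best_len:
--                 best_idx = i
--                 best_len = doc_len
--
--         if best_idx >= 0:
--             doc = doc_buffer.pop(best_idx)
--             row.extend(doc)
--             pos += len(doc)
--         else:
--             shortest_idx = min(range(len(doc_buffer)), key=lambda i: len(doc_buffer[i]))
--             doc = doc_buffer.pop(shortest_idx)
--             row.extend(doc[:remaining])
--             pos += remaining
--
--     if len(row) != row_capacity:
--         return None
--     return row
-- ===== SOURCE B (Python) =====
-- def _pack_row(doc_buffer: list[list[int]], row_capacity: int) -> list[int] | None:
--     """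
--     Pack a single row: sort doc indices once by (length descending, position ascending),
--     then fill the row in a single left-to-right pass (each pointer doc either fits now
--     or can never fit later, since the remaining space only shrinks); finally crop the
--     shortest leftover doc to fill the gap.  Unlike A, this does not consume doc_buffer.
--     """
--     if row_capacity <= 0:
--         return [] if row_capacity == 0 else None
--     order = sorted(range(len(doc_buffer)), key=lambda i: (-len(doc_buffer[i]), i))
--     row: list[int] = []
--     pos = 0
--     skipped: list[int] = []
--     p = 0
--     while pos < row_capacity and p < len(order):
--         i = order[p]
--         d = doc_buffer[i]
--         if not d:
--             return None  # only empty docs (plus oversize skipped ones) remain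
--         if len(d) <= row_capacity - pos:
--             row += d
--             pos += len(d)
--         else:
--             skipped.append(i)
--         p += 1
--     if pos == row_capacity:
--         return row
--     if not skipped:
--         return None  # buffer ran dry
--     i = min(skipped, key=lambda j: (len(doc_buffer[j]), j))
--     return row + doc_buffer[i][:row_capacity - pos]
-- ===== Notes on version B (the rewrite author's own statement) =====
-- stated objective: alternative
-- what changed: A rescans the whole shrinking buffer for the largest fitting doc on every step (and pops, mutating the argument); B sorts the indices once by (length desc, position asc) and fills the row in a single pointer pass, since the remaining space only shrinks a skipped doc never fits again, with one final min-scan over the skipped docs for the crop; B does not mutate doc_buffer.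
import Mathlib
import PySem

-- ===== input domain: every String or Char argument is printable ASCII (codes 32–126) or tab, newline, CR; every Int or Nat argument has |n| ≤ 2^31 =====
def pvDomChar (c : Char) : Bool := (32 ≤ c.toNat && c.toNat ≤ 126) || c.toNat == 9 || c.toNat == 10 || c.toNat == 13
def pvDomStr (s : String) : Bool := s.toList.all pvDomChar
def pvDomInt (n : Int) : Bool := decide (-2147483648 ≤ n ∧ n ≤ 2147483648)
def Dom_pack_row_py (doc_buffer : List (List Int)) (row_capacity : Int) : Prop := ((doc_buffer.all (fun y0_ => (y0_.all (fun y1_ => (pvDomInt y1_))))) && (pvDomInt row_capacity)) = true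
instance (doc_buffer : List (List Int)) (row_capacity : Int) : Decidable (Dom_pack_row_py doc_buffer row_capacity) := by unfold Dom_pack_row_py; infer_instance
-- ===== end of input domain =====

-- B replaces A's rescan-and-pop best-fit loop by one sort of the indices by
-- (length desc, position asc) plus a single pointer pass over them;
-- A mutates doc_buffer in place (pop) while B leaves it untouched: the equivalence proved here
-- is about the RETURN value only.

-- ===== PORT A =====
-- inner scan: for i, doc in enumerate(doc_buffer): keep (best_idx, best_len)
def aBestGo (remaining : Int) (st : Int × Int) (ps : List (Int × List Int)) : Int × Int :=
  ps.foldl (fun st p =>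
    if (p.2.length : Int) ≤ remaining ∧ st.2 < (p.2.length : Int) then (p.1, (p.2.length : Int)) else st) st

def aBest (bs : List (List Int)) (remaining : Int) : Int × Int :=
  aBestGo remaining (-1, 0) (PySem.List.enumerate bs)

-- the while loop; each iteration pops one doc, so it recurses on the buffer length
def aLoop (cap : Int) (bs : List (List Int)) (pos : Int) (row : List Int) : List Int :=
  if pos < cap ∧ bs ≠ [] then
    let remaining := cap - pos
    let best := aBest bs remaining
    if 0 ≤ best.1 then
      match h : PySem.List.pop? bs best.1 with
      | some dr => aLoop cap dr.2 (pos + dr.1.length) (row ++ dr.1)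
      | none => row   -- unreachable: aBest yields an in-range index when ≥ 0
    else
      match PySem.List.min? (PySem.List.pyRange 0 bs.length 1)
              (fun i => ((PySem.List.pyGetD bs i []).length : Int)) with
      | some si =>
        match h2 : PySem.List.pop? bs si with
        | some dr => aLoop cap dr.2 (pos + remaining) (row ++ PySem.List.slice dr.1 none (some remaining))
        | none => row   -- unreachable
      | none => row   -- unreachable: bs ≠ []
  else row
termination_by bs.length
decreasing_by
  · have := PySem.List.length_of_pop?_eq_some bs h; omega
  · have := PySem.List.length_of_pop?_eq_some bs h2; omega

def pack_row_py (doc_buffer : List (List Int)) (row_capacity : Int) : Option (List Int) :=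
  let row := aLoop row_capacity doc_buffer 0 []
  if (row.length : Int) ≠ row_capacity then none else some row

-- ===== PORT B =====
-- len(doc_buffer[i])
def bLen (D : List (List Int)) (i : Int) : Int := ((PySem.List.pyGetD D i []).length : Int)

-- the tail after the scan loop: exact fill / dry buffer / crop the shortest skipped doc
def bFinish (D : List (List Int)) (cap : Int) (skipped : List Int) (pos : Int) (row : List Int) :
    Option (List Int) :=
  if pos = cap then some row
  else if skipped = [] then none
  else
    match PySem.List.min2? skipped (fun j => bLen D j) (fun j => j) with
    | some i => some (row ++ PySem.List.slice (PySem.List.pyGetD D i []) none (some (cap - pos)))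
    | none => none   -- unreachable: skipped ≠ []

-- the single pointer pass over the sorted index list
def bLoop (D : List (List Int)) (cap : Int) (os skipped : List Int) (pos : Int) (row : List Int) :
    Option (List Int) :=
  match os with
  | [] => bFinish D cap skipped pos row
  | i :: rest =>
    if pos < cap then
      let d := PySem.List.pyGetD D i []
      if d = [] then none   -- only empty docs (plus oversize skipped ones) remain
      else if (d.length : Int) ≤ cap - pos then
        bLoop D cap rest skipped (pos + d.length) (row ++ d)
      else
        bLoop D cap rest (skipped ++ [i]) pos row
    else bFinish D cap skipped pos row

def pack_row_py_alt (doc_buffer : List (List Int)) (row_capacity : Int) : Option (List Int) :=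
  if row_capacity ≤ 0 then (if row_capacity = 0 then some [] else none)
  else
    bLoop doc_buffer row_capacity
      (PySem.List.sorted2 (PySem.List.pyRange 0 doc_buffer.length 1)
        (fun i => -(bLen doc_buffer i)) (fun i => i))
      [] 0 []

-- ===== PRECONDITION & SPEC =====
def Spec_pack_row_py (doc_buffer : List (List Int)) (row_capacity : Int) (out : Option (List Int)) : Prop := out = pack_row_py_alt doc_buffer row_capacity
instance (doc_buffer : List (List Int)) (row_capacity : Int) (out : Option (List Int)) : Decidable (Spec_pack_row_py doc_buffer row_capacity out) := by unfold Spec_pack_row_py; infer_instance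

-- ===== CLAIM (what is proved, stated in full; the proofs are below) =====
def Claim_equal_pack_row_py : Prop := ∀ (doc_buffer : List (List Int)) (row_capacity : Int), Dom_pack_row_py doc_buffer row_capacity → Spec_pack_row_py doc_buffer row_capacity (pack_row_py doc_buffer row_capacity)

-- ===== LEMMAS AND PROOFS =====

-- ---- A's inner best-fit scan ----

lemma aBestGo_noupdate (r : Int) :
    ∀ (ps : List (Int × List Int)) (st : Int × Int),
      (∀ p ∈ ps, ¬((p.2.length : Int) ≤ r ∧ st.2 < (p.2.length : Int))) → aBestGo r st ps = st := by
  intro ps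
  induction ps with
  | nil => intro st _; rfl
  | cons p ps ih =>
    intro st h
    have hp := h p (by simp)
    simp only [aBestGo, List.foldl_cons, if_neg hp]
    exact ih st (fun q hq => h q (by simp [hq]))

lemma aBestGo_pick (r : Int) :
    ∀ (u : List (List Int)) (d : List Int) (v : List (List Int)) (s : Int) (st : Int × Int),
      st.2 < (d.length : Int) → (d.length : Int) ≤ r →
      (∀ x ∈ u, (x.length : Int) ≤ r → (x.length : Int) < (d.length : Int)) →
      (∀ x ∈ v, (x.length : Int) ≤ r → (x.length : Int) ≤ (d.length : Int)) →
      aBestGo r st (PySem.List.enumerate (u ++ d :: v) s) = (s + (u.length : Int), (d.length : Int)) := by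
  intro u
  induction u with
  | nil =>
    intro d v s st hst hd _ hv
    rw [List.nil_append, PySem.List.enumerate_cons]
    have hcond : (d.length : Int) ≤ r ∧ st.2 < (d.length : Int) := ⟨hd, hst⟩
    simp only [aBestGo, List.foldl_cons, if_pos hcond]
    have := aBestGo_noupdate r (PySem.List.enumerate v (s + 1)) (s, (d.length : Int)) (by
      intro p hp
      have hpv : p.2 ∈ v := by
        have := List.mem_map_of_mem (f := fun x => x.2) hp
        rwa [PySem.List.map_snd_enumerate] at this
      intro ⟨h1, h2⟩
      exact absurd (hv _ hpv h1) (by omega))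
    simp only [aBestGo] at this
    rw [this]
    simp
  | cons x u ih =>
    intro d v s st hst hd hu hv
    rw [List.cons_append, PySem.List.enumerate_cons]
    simp only [aBestGo, List.foldl_cons]
    have step : ∀ st' : Int × Int, st'.2 < (d.length : Int) →
        aBestGo r st' (PySem.List.enumerate (u ++ d :: v) (s+1))
          = (s + ((x :: u).length : Int), (d.length : Int)) := by
      intro st' hst'
      rw [ih d v (s+1) st' hst' hd (fun y hy => hu y (by simp [hy])) hv]
      refine Prod.ext ?_ rfl
      simp; omega
    by_cases hc : ((x.length : Int) ≤ r ∧ st.2 < (x.length : Int))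
    · rw [if_pos hc]
      exact step (s, (x.length : Int)) (hu x (by simp) hc.1)
    · rw [if_neg hc]
      exact step st hst

-- ---- Python min(..., key=...): the first minimum ----

lemma minFold_spec {α κ : Type} [LinearOrder κ] (key : α → κ) (f : Option α → α → Option α)
    (hf : ∀ mm x, f (some mm) x = if key x < key mm then some x else some mm) :
    ∀ (t : List α) (cur m : α), t.foldl f (some cur) = some m →
      (m = cur ∧ ∀ y ∈ t, key cur ≤ key y) ∨
      (∃ pre suf, t = pre ++ m :: suf ∧ key m < key cur ∧ (∀ y ∈ pre, key m < key y) ∧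
        (∀ y ∈ suf, key m ≤ key y)) := by
  intro t
  induction t with
  | nil => intro cur m h; left; simp_all
  | cons y t ih =>
    intro cur m h
    rw [List.foldl_cons, hf] at h
    by_cases hc : key y < key cur
    · rw [if_pos hc] at h
      rcases ih y m h with ⟨rfl, hall⟩ | ⟨pre, suf, rfl, hlt, hpre, hsuf⟩
      · right; exact ⟨[], t, rfl, hc, by simp, hall⟩
      · right
        refine ⟨y :: pre, suf, rfl, lt_trans hlt hc, ?_, hsuf⟩
        intro z hz
        rcases List.mem_cons.mp hz with rfl | hz
        · exact hlt
        · exact hpre z hz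
    · rw [if_neg hc] at h
      rcases ih cur m h with ⟨rfl, hall⟩ | ⟨pre, suf, rfl, hlt, hpre, hsuf⟩
      · left
        refine ⟨rfl, ?_⟩
        intro z hz
        rcases List.mem_cons.mp hz with rfl | hz
        · exact le_of_not_gt hc
        · exact hall z hz
      · right
        refine ⟨y :: pre, suf, rfl, hlt, ?_, hsuf⟩
        intro z hz
        rcases List.mem_cons.mp hz with rfl | hz
        · exact lt_of_lt_of_le hlt (le_of_not_gt hc)
        · exact hpre z hz

lemma min?_spec {α κ : Type} [LinearOrder κ] (xs : List α) (key : α → κ) (m : α)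
    (h : PySem.List.min? xs key = some m) :
    ∃ pre suf, xs = pre ++ m :: suf ∧ (∀ y ∈ pre, key m < key y) ∧ (∀ y ∈ suf, key m ≤ key y) := by
  match xs with
  | [] => simp [PySem.List.min?] at h
  | x :: t =>
    simp only [PySem.List.min?, List.foldl_cons] at h
    rcases minFold_spec key _ (fun mm x => rfl) t x m h with ⟨rfl, hall⟩ | ⟨pre, suf, rfl, hx, hpre, hsuf⟩
    · exact ⟨[], t, rfl, by simp, hall⟩
    · refine ⟨x :: pre, suf, rfl, ?_, hsuf⟩
      intro z hz
      rcases List.mem_cons.mp hz with rfl | hz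
      · exact hx
      · exact hpre z hz

-- ---- Python min(..., key=lambda j: (len, j)): the unique lexicographic minimum ----

lemma min2Fold_spec (D : List (List Int)) (f : Option Int → Int → Option Int)
    (hf : ∀ mm x, f (some mm) x =
      if (decide (bLen D x < bLen D mm) || !decide (bLen D mm < bLen D x) && decide (x < mm)) = true
      then some x else some mm) :
    ∀ (t : List Int) (cur m : Int), t.foldl f (some cur) = some m →
      (m = cur ∨ m ∈ t) ∧ ∀ y ∈ cur :: t, bLen D m < bLen D y ∨ (bLen D m = bLen D y ∧ m ≤ y) := by
  intro t
  induction t with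
  | nil =>
    intro cur m h
    simp only [List.foldl_nil, Option.some.injEq] at h
    subst h
    exact ⟨Or.inl rfl, by intro y hy; simp at hy; subst hy; right; exact ⟨rfl, le_refl _⟩⟩
  | cons y t ih =>
    intro cur m h
    rw [List.foldl_cons, hf] at h
    by_cases hc : (decide (bLen D y < bLen D cur) || !decide (bLen D cur < bLen D y) && decide (y < cur)) = true
    · rw [if_pos hc] at h
      simp only [Bool.or_eq_true, Bool.and_eq_true, Bool.not_eq_eq_eq_not, Bool.not_true,
        decide_eq_true_eq, decide_eq_false_iff_not] at hc
      obtain ⟨hmem, hall⟩ := ih y m h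
      have hmem' : m ∈ y :: t := by
        rcases hmem with rfl | hm
        · simp
        · simp [hm]
      refine ⟨Or.inr hmem', ?_⟩
      intro z hz
      rcases List.mem_cons.mp hz with rfl | hz
      · have hy := hall y (by simp)
        rcases hc with h1 | ⟨h2, h3⟩ <;> rcases hy with h4 | ⟨h5, h6⟩
        · left; omega
        · left; omega
        · left; omega
        · by_cases h7 : bLen D m < bLen D z
          · left; exact h7
          · right; constructor <;> omega
      · exact hall z hz
    · rw [if_neg hc] at h
      simp only [Bool.or_eq_true, Bool.and_eq_true, Bool.not_eq_eq_eq_not, Bool.not_true,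
        decide_eq_true_eq, decide_eq_false_iff_not] at hc
      rw [not_or] at hc
      obtain ⟨hmem, hall⟩ := ih cur m h
      have hmem' : m = cur ∨ m ∈ y :: t := by
        rcases hmem with rfl | hm
        · exact Or.inl rfl
        · exact Or.inr (by simp [hm])
      refine ⟨hmem', ?_⟩
      intro z hz
      rcases List.mem_cons.mp hz with rfl | hz
      · exact hall z (by simp)
      rcases List.mem_cons.mp hz with rfl | hz
      · have hcur := hall cur (by simp)
        obtain ⟨h1, h2⟩ := hc
        rcases hcur with h4 | ⟨h5, h6⟩
        · left; omega
        · by_cases h7 : bLen D cur < bLen D z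
          · left; omega
          · right; constructor <;> omega
      · exact hall z (by simp [hz])

lemma min2_spec (D : List (List Int)) (sk : List Int) (m : Int)
    (h : PySem.List.min2? sk (fun j => bLen D j) (fun j => j) = some m) :
    m ∈ sk ∧ ∀ y ∈ sk, bLen D m < bLen D y ∨ (bLen D m = bLen D y ∧ m ≤ y) := by
  match sk with
  | [] => simp [PySem.List.min2?] at h
  | x :: t =>
    simp only [PySem.List.min2?, List.foldl_cons] at h
    obtain ⟨hmem, hall⟩ := min2Fold_spec D _ (fun mm x => rfl) t x m h
    have hmem' : m ∈ x :: t := by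
      rcases hmem with rfl | hm
      · simp
      · simp [hm]
    exact ⟨hmem', hall⟩

lemma min2_isSome (D : List (List Int)) (x : Int) (t : List Int) :
    ∃ m, PySem.List.min2? (x :: t) (fun j => bLen D j) (fun j => j) = some m := by
  simp only [PySem.List.min2?, List.foldl_cons]
  induction t generalizing x with
  | nil => exact ⟨x, rfl⟩
  | cons y t ih =>
    simp only [List.foldl_cons]
    by_cases hc : (decide (bLen D y < bLen D x) || !decide (bLen D x < bLen D y) && decide (y < x)) = true
    · simpa [hc] using ih y
    · simpa [hc] using ih x

-- ---- sorted(..., key=lambda i: (-len, i)) is pairwise lexicographically ordered ----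

lemma insertBy_pairwise_R {α : Type} (before : α → α → Bool)
    (hasym : ∀ a b, before a b = true → before b a = false)
    (htrans : ∀ a b c, before a b = true → before b c = true → before a c = true)
    (x : α) : ∀ (ys : List α), ys.Pairwise (fun a b => before b a = false) →
      (PySem.List.insertBy before x ys).Pairwise (fun a b => before b a = false) := by
  intro ys
  induction ys with
  | nil => intro _; simp [PySem.List.insertBy]
  | cons y ys ih =>
    intro hpw
    rw [List.pairwise_cons] at hpw
    obtain ⟨hy, hys⟩ := hpw
    by_cases hb : before x y = true
    · rw [show PySem.List.insertBy before x (y :: ys) = x :: y :: ys from by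
        simp [PySem.List.insertBy, hb]]
      refine List.Pairwise.cons ?_ (List.Pairwise.cons hy hys)
      intro z hz
      rcases List.mem_cons.mp hz with rfl | hz
      · exact hasym _ _ hb
      · by_cases hzx : before z x = true
        · exact absurd (htrans _ _ _ hzx hb) (by simp [hy z hz])
        · simpa using hzx
    · rw [show PySem.List.insertBy before x (y :: ys) = y :: PySem.List.insertBy before x ys from by
        simp [PySem.List.insertBy, hb]]
      refine List.Pairwise.cons ?_ (ih hys)
      intro z hz
      rcases (PySem.List.mem_insertBy before x z ys).mp hz with rfl | hz
      · simpa using hb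
      · exact hy z hz

lemma foldl_insertBy_pairwise {α : Type} (before : α → α → Bool)
    (hasym : ∀ a b, before a b = true → before b a = false)
    (htrans : ∀ a b c, before a b = true → before b c = true → before a c = true) :
    ∀ (xs acc : List α), acc.Pairwise (fun a b => before b a = false) →
      (xs.foldl (fun acc x => PySem.List.insertBy before x acc) acc).Pairwise
        (fun a b => before b a = false) := by
  intro xs
  induction xs with
  | nil => intro acc h; exact h
  | cons x xs ih =>
    intro acc h
    exact ih _ (insertBy_pairwise_R before hasym htrans x acc h)

lemma sorted2_pairwise_lex (D : List (List Int)) (xs : List Int) :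
    (PySem.List.sorted2 xs (fun i => -(bLen D i)) (fun i => i) false).Pairwise
      (fun a b => bLen D b < bLen D a ∨ (bLen D a = bLen D b ∧ a ≤ b)) := by
  simp only [PySem.List.sorted2]
  have hmain := foldl_insertBy_pairwise
    (fun a b => decide ((-(bLen D a)) < -(bLen D b)) ||
      (!decide ((-(bLen D b)) < -(bLen D a)) && decide (a < b)))
    (by intro a b h
        simp only [Bool.or_eq_true, Bool.and_eq_true, Bool.not_eq_eq_eq_not,
          Bool.not_true, decide_eq_true_eq, decide_eq_false_iff_not] at h
        rw [Bool.eq_false_iff]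
        intro hc
        simp only [Bool.or_eq_true, Bool.and_eq_true, Bool.not_eq_eq_eq_not,
          Bool.not_true, decide_eq_true_eq, decide_eq_false_iff_not] at hc
        omega)
    (by intro a b c h1 h2
        simp only [Bool.or_eq_true, Bool.and_eq_true, Bool.not_eq_eq_eq_not,
          Bool.not_true, decide_eq_true_eq, decide_eq_false_iff_not] at h1 h2 ⊢
        omega)
    xs [] (by simp)
  refine List.Pairwise.imp ?_ hmain
  intro a b hab
  have h' := Bool.eq_false_iff.mp hab
  simp only [Bool.or_eq_true, Bool.and_eq_true, Bool.not_eq_eq_eq_not, Bool.not_true,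
    decide_eq_true_eq, decide_eq_false_iff_not, ne_eq] at h'
  omega

-- ---- small list facts ----

lemma eraseIdx_append_cons {α : Type} : ∀ (u : List α) (d : α) (v : List α),
    (u ++ d :: v).eraseIdx u.length = u ++ v := by
  intro u
  induction u with
  | nil => intro d v; rfl
  | cons x u ih => intro d v; simpa [List.eraseIdx] using ih d v

lemma pop_at_append (u : List (List Int)) (d : List Int) (v : List (List Int)) :
    PySem.List.pop? (u ++ d :: v) (u.length : Int) = some (d, u ++ v) := by
  have hlt : u.length < (u ++ d :: v).length := by simp
  rw [PySem.List.pop?_natCast _ _ hlt]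
  simp [List.getElem_append_right, eraseIdx_append_cons]

lemma getElem_append_cons {α : Type} (u : List α) (d : α) (v : List α) :
    (u ++ d :: v)[u.length]'(by simp) = d := by
  simp [List.getElem_append_right]

-- ---- unfolding A's loop one step at a time ----

lemma aLoop_stop (cap : Int) (bs : List (List Int)) (pos : Int) (row : List Int)
    (h : ¬ pos < cap) : aLoop cap bs pos row = row := by
  rw [aLoop.eq_def]
  simp [h]

lemma aLoop_nil (cap pos : Int) (row : List Int) : aLoop cap [] pos row = row := by
  rw [aLoop.eq_def]; simp

lemma aLoop_take (cap : Int) (bs : List (List Int)) (pos : Int) (row : List Int)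
    (hpos : pos < cap) (hne : bs ≠ []) (m L : Int)
    (hbest : aBest bs (cap - pos) = (m, L)) (hm : 0 ≤ m)
    (dr : List Int × List (List Int)) (hpop : PySem.List.pop? bs m = some dr) :
    aLoop cap bs pos row = aLoop cap dr.2 (pos + dr.1.length) (row ++ dr.1) := by
  have hc : pos < cap ∧ bs ≠ [] := ⟨hpos, hne⟩
  rw [aLoop.eq_def, if_pos hc]
  simp only [hbest]
  rw [if_pos hm]
  split
  · next dr' heq =>
    simp only [hbest] at heq
    rw [hpop] at heq
    injection heq with heq'
    subst heq'
    rfl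
  · next heq =>
    simp only [hbest] at heq
    rw [hpop] at heq
    cases heq

lemma aLoop_crop (cap : Int) (bs : List (List Int)) (pos : Int) (row : List Int)
    (hpos : pos < cap) (hne : bs ≠ [])
    (hbest : aBest bs (cap - pos) = (-1, 0)) (m : Int)
    (hmin : PySem.List.min? (PySem.List.pyRange 0 bs.length 1)
        (fun i => ((PySem.List.pyGetD bs i []).length : Int)) = some m)
    (dr : List Int × List (List Int)) (hpop : PySem.List.pop? bs m = some dr) :
    aLoop cap bs pos row
      = aLoop cap dr.2 (pos + (cap - pos))
          (row ++ PySem.List.slice dr.1 none (some (cap - pos))) := by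
  have hc : pos < cap ∧ bs ≠ [] := ⟨hpos, hne⟩
  rw [aLoop.eq_def, if_pos hc]
  simp only [hbest]
  rw [if_neg (by omega : ¬ (0:Int) ≤ ((-1 : Int), (0:Int)).1)]
  split
  · next si heq =>
    rw [hmin] at heq
    injection heq with heq'
    subst heq'
    split
    · next dr' heq2 =>
      rw [hpop] at heq2
      injection heq2 with heq2'
      subst heq2'
      rfl
    · next heq2 =>
      rw [hpop] at heq2
      cases heq2
  · next heq =>
    rw [hmin] at heq
    cases heq

-- ---- min over range(len(...)) : position and firstness ----

lemma minRange_spec (n : Nat) (key : Int → Int) (m : Int)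
    (h : PySem.List.min? (PySem.List.pyRange 0 (n : Int) 1) key = some m) :
    ∃ k : Nat, k < n ∧ m = (k : Int) ∧ (∀ j : Nat, j < k → key (k : Int) < key (j : Int)) ∧
      (∀ j : Nat, j < n → key (k : Int) ≤ key (j : Int)) := by
  obtain ⟨pre, suf, hdec, hpre, hsuf⟩ := min?_spec _ key m h
  rw [PySem.List.pyRange_zero_natCast] at hdec
  have hlen : n = pre.length + 1 + suf.length := by
    have := congrArg List.length hdec
    simp at this
    omega
  have hk : pre.length < n := by omega
  have hmlt : pre.length < (List.map (fun k : Nat => (k : Int)) (List.range n)).length := by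
    rw [List.length_map, List.length_range]; exact hk
  have hm : m = (pre.length : Int) := by
    have h2 : (List.map (fun k : Nat => (k : Int)) (List.range n))[pre.length]'hmlt = m := by
      rw [List.getElem_of_eq hdec hmlt]
      exact getElem_append_cons pre m suf
    rw [← h2, List.getElem_map]
    simp
  refine ⟨pre.length, hk, hm, ?_, ?_⟩
  · intro j hj
    have hjlt : j < (List.map (fun k : Nat => (k : Int)) (List.range n)).length := by
      rw [List.length_map, List.length_range]; omega
    have hjpre : ((j : Int)) ∈ pre := by
      have h2 : (List.map (fun k : Nat => (k : Int)) (List.range n))[j]'hjlt = pre[j]'hj := by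
        rw [List.getElem_of_eq hdec hjlt]
        exact List.getElem_append_left hj
      have h3 : pre[j]'hj = ((j : Int)) := by
        rw [← h2, List.getElem_map]
        simp
      rw [← h3]
      exact List.getElem_mem hj
    have := hpre _ hjpre
    rwa [hm] at this
  · intro j hj
    have hmem : ((j : Int)) ∈ PySem.List.pyRange 0 (n : Int) 1 := by
      rw [PySem.List.pyRange_zero_natCast]
      simp [hj]
    have := PySem.List.min?_isMin h _ hmem
    rwa [hm] at this

-- ---- the simulation invariant ----

-- I is the ascending list of indices of the docs still in A's buffer; B holds the same docs
-- split into `skipped` (each strictly longer than the remaining gap) and the untouched suffix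
-- `os` of the sorted order (still sorted by length desc, index asc).
def SimInv (D : List (List Int)) (cap : Int) (os sk : List Int) (bs : List (List Int)) (pos : Int) : Prop :=
  ∃ I : List Int,
    I.Pairwise (· < ·) ∧
    (sk ++ os).Perm I ∧
    bs = I.map (fun i => PySem.List.pyGetD D i []) ∧
    (∀ j ∈ sk, cap - pos < bLen D j) ∧
    os.Pairwise (fun a b => bLen D b < bLen D a ∨ (bLen D a = bLen D b ∧ a < b))

lemma sim (D : List (List Int)) (cap : Int) :
    ∀ os sk bs pos (row : List Int), SimInv D cap os sk bs pos →
      (row.length : Int) = pos → pos ≤ cap → 0 < cap →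
      (if ((aLoop cap bs pos row).length : Int) ≠ cap then none
        else some (aLoop cap bs pos row)) = bLoop D cap os sk pos row := by
  intro os
  induction os with
  | nil =>
    intro sk bs pos row hinv hrow hle _
    obtain ⟨I, hIpw, hperm, hbs, hsk, -⟩ := hinv
    subst hbs
    by_cases hpos : pos < cap
    case neg =>
      -- pos = cap : the row is complete on both sides
      have hpc : pos = cap := le_antisymm hle (not_lt.mp hpos)
      rw [aLoop_stop cap _ pos row hpos]
      rw [if_neg (by omega)]
      simp [bLoop, bFinish, hpc]
    case pos =>
      -- still short of the capacity and the sorted order is exhausted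
      match sk, hperm, hsk with
      | [], hperm, hsk =>
        have hI : I = [] := List.nil_perm.mp (by simpa using hperm)
        subst hI
        rw [List.map_nil, aLoop_nil]
        rw [if_pos (by omega)]
        simp [bLoop, bFinish, show ¬ pos = cap by omega]
      | s0 :: sk', hperm, hsk =>
        -- A finds no fitting doc (everything left is longer than the gap) and crops;
        -- B crops the same doc: the unique (len, index)-minimal skipped one.
        have hmemI : ∀ j ∈ I, j ∈ s0 :: sk' := by
          intro j hj
          have := hperm.symm.mem_iff.mp hj
          simpa using this
        have hallI : ∀ j ∈ I, cap - pos < bLen D j := fun j hj => hsk j (hmemI j hj)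
        have hs0I : s0 ∈ I := hperm.mem_iff.mp (by simp)
        have hIne : I ≠ [] := fun hnil => by simp [hnil] at hs0I
        have hbsne : I.map (fun i => PySem.List.pyGetD D i []) ≠ [] := by
          simpa using hIne
        have hbest : aBest (I.map (fun i => PySem.List.pyGetD D i [])) (cap - pos) = (-1, 0) := by
          apply aBestGo_noupdate
          intro p hp
          have hp2 : p.2 ∈ I.map (fun i => PySem.List.pyGetD D i []) := by
            have := List.mem_map_of_mem (f := fun x => x.2) hp
            rwa [PySem.List.map_snd_enumerate] at this
          obtain ⟨j, hjI, hj2⟩ := List.mem_map.mp hp2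
          intro hcon
          have hlong := hallI j hjI
          unfold bLen at hlong
          rw [← hj2] at hcon
          exact absurd hcon.1 (by omega)
        rcases hmino : PySem.List.min? (PySem.List.pyRange 0 ((I.map (fun i => PySem.List.pyGetD D i [])).length) 1)
            (fun i => ((PySem.List.pyGetD (I.map (fun i => PySem.List.pyGetD D i [])) i []).length : Int)) with - | m
        · rw [PySem.List.min?_eq_none_iff] at hmino
          exfalso
          have hlp : (0:Int) < ((I.map (fun i => PySem.List.pyGetD D i [])).length : Int) := by
            have := List.length_pos_iff.mpr hbsne
            omega
          rw [PySem.List.pyRange_one_cons hlp] at hmino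
          cases hmino
        obtain ⟨k, hkn, hmk, hfirst, hminim⟩ := by
          rw [show (I.map (fun i => PySem.List.pyGetD D i [])).length = I.length from by simp] at hmino
          exact minRange_spec I.length _ m hmino
        obtain ⟨istar, hmin2⟩ := min2_isSome D s0 sk'
        obtain ⟨histar, hlex⟩ := min2_spec D _ _ hmin2
        have hkey : ∀ (j : Nat) (hj : j < I.length),
            ((PySem.List.pyGetD (I.map (fun i => PySem.List.pyGetD D i [])) (j : Int) []).length : Int)
              = bLen D (I[j]'hj) := by
          intro j hj
          rw [PySem.List.pyGetD_eq_getElem _ [] (by omega) (by simp; omega)]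
          simp [bLen]
        have hkI : I[k]'hkn = istar := by
          obtain ⟨q, hq, hIq⟩ := List.getElem_of_mem (hperm.mem_iff.mp (by simpa using histar))
          have hq1 : bLen D (I[k]'hkn) ≤ bLen D istar := by
            have := hminim q hq
            rw [hkey k hkn, hkey q hq, hIq] at this
            exact this
          have hq2 : bLen D istar < bLen D (I[k]'hkn) ∨
              (bLen D istar = bLen D (I[k]'hkn) ∧ istar ≤ I[k]'hkn) :=
            hlex _ (hmemI _ (List.getElem_mem hkn))
          rcases Nat.lt_trichotomy q k with hqk | rfl | hqk
          · exfalso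
            have := hfirst q hqk
            rw [hkey k hkn, hkey q hq, hIq] at this
            omega
          · exact hIq
          · exfalso
            have hmono : I[k]'hkn < I[q]'hq := List.pairwise_iff_getElem.mp hIpw k q hkn hq hqk
            rw [hIq] at hmono
            omega
        have hklt : k < (I.map (fun i => PySem.List.pyGetD D i [])).length := by simpa using hkn
        have hpop := PySem.List.pop?_natCast (I.map (fun i => PySem.List.pyGetD D i [])) k hklt
        have hbsk : (I.map (fun i => PySem.List.pyGetD D i []))[k]'hklt
            = PySem.List.pyGetD D istar [] := by
          simp only [List.getElem_map]
          rw [hkI]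
        rw [hmk] at hmino
        rw [aLoop_crop cap _ pos row hpos hbsne hbest (k : Int) hmino _ hpop,
          show pos + (cap - pos) = cap by ring, aLoop_stop _ _ _ _ (by omega)]
        have hlong : cap - pos
            < (((I.map (fun i => PySem.List.pyGetD D i []))[k]'hklt).length : Int) := by
          have := hallI _ (List.getElem_mem hkn)
          unfold bLen at this
          simpa using this
        have hslice : PySem.List.slice ((I.map (fun i => PySem.List.pyGetD D i []))[k]'hklt)
              none (some (cap - pos))
            = List.take (cap - pos).toNat ((I.map (fun i => PySem.List.pyGetD D i []))[k]'hklt) :=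
          PySem.List.slice_to _ (by omega)
        have hlenrow : (((row ++ PySem.List.slice ((I.map (fun i => PySem.List.pyGetD D i []))[k]'hklt)
            none (some (cap - pos)))).length : Int) = cap := by
          rw [hslice]
          simp only [List.length_append, List.length_take]
          push_cast
          omega
        rw [if_neg (by rw [hlenrow]; omega)]
        simp only [bLoop, bFinish]
        rw [if_neg (by omega : ¬ pos = cap), if_neg (by simp : ¬ (s0 :: sk' = [])), hmin2]
        rw [hbsk]
  | cons i rest ih =>
    intro sk bs pos row hinv hrow hle hcap
    obtain ⟨I, hIpw, hperm, hbs, hsk, hospw⟩ := hinv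
    subst hbs
    by_cases hpos : pos < cap
    case neg =>
      have hpc : pos = cap := le_antisymm hle (not_lt.mp hpos)
      rw [aLoop_stop cap _ pos row hpos]
      rw [if_neg (by omega)]
      simp [bLoop, bFinish, hpc]
    case pos =>
      have hiI : i ∈ I := hperm.mem_iff.mp (by simp)
      have hIne : I ≠ [] := fun hnil => by simp [hnil] at hiI
      have hbsne : I.map (fun i => PySem.List.pyGetD D i []) ≠ [] := by simpa using hIne
      have hosr : List.Pairwise (fun a b => bLen D b < bLen D a ∨ (bLen D a = bLen D b ∧ a < b)) rest :=
        (List.pairwise_cons.mp hospw).2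
      have hihead : ∀ j ∈ rest, bLen D j < bLen D i ∨ (bLen D i = bLen D j ∧ i < j) :=
        (List.pairwise_cons.mp hospw).1
      simp only [bLoop]
      rw [if_pos hpos]
      by_cases hd0 : PySem.List.pyGetD D i [] = []
      · -- only empty docs (and oversize skipped ones) are left: A crops an empty doc and
        -- comes up short, B reports the dry buffer directly
        rw [if_pos hd0]
        have hlen0 : bLen D i = 0 := by unfold bLen; rw [hd0]; simp
        have hclass : ∀ j ∈ I, bLen D j = 0 ∨ cap - pos < bLen D j := by
          intro j hj
          have hj' : j ∈ sk ++ i :: rest := hperm.symm.mem_iff.mp hj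
          rcases List.mem_append.mp hj' with hj' | hj'
          · exact Or.inr (hsk j hj')
          · rcases List.mem_cons.mp hj' with rfl | hj'
            · exact Or.inl hlen0
            · left
              have hb0 : 0 ≤ bLen D j := by unfold bLen; positivity
              rcases hihead j hj' with h | ⟨h, -⟩ <;> omega
        have hbest : aBest (I.map (fun i => PySem.List.pyGetD D i [])) (cap - pos) = (-1, 0) := by
          apply aBestGo_noupdate
          intro p hp
          have hp2 : p.2 ∈ I.map (fun i => PySem.List.pyGetD D i []) := by
            have := List.mem_map_of_mem (f := fun x => x.2) hp
            rwa [PySem.List.map_snd_enumerate] at this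
          obtain ⟨j, hjI, hj2⟩ := List.mem_map.mp hp2
          intro hcon
          have hcl := hclass j hjI
          unfold bLen at hcl
          rw [← hj2] at hcon
          rcases hcl with h | h
          · exact absurd hcon.2 (by omega)
          · exact absurd hcon.1 (by omega)
        rcases hmino : PySem.List.min? (PySem.List.pyRange 0 ((I.map (fun i => PySem.List.pyGetD D i [])).length) 1)
            (fun i => ((PySem.List.pyGetD (I.map (fun i => PySem.List.pyGetD D i [])) i []).length : Int)) with - | m
        · rw [PySem.List.min?_eq_none_iff] at hmino
          exfalso
          have hlp : (0:Int) < ((I.map (fun i => PySem.List.pyGetD D i [])).length : Int) := by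
            have := List.length_pos_iff.mpr hbsne
            omega
          rw [PySem.List.pyRange_one_cons hlp] at hmino
          cases hmino
        obtain ⟨k, hkn, hmk, -, hminim⟩ := by
          rw [show (I.map (fun i => PySem.List.pyGetD D i [])).length = I.length from by simp] at hmino
          exact minRange_spec I.length _ m hmino
        have hkey : ∀ (j : Nat) (hj : j < I.length),
            ((PySem.List.pyGetD (I.map (fun i => PySem.List.pyGetD D i [])) (j : Int) []).length : Int)
              = bLen D (I[j]'hj) := by
          intro j hj
          rw [PySem.List.pyGetD_eq_getElem _ [] (by omega) (by simp; omega)]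
          simp [bLen]
        obtain ⟨q, hq, hIq⟩ := List.getElem_of_mem hiI
        have hklt : k < (I.map (fun i => PySem.List.pyGetD D i [])).length := by simpa using hkn
        have hk0 : (I.map (fun i => PySem.List.pyGetD D i []))[k]'hklt = [] := by
          have h1 := hminim q hq
          rw [hkey k hkn, hkey q hq, hIq, hlen0] at h1
          have h2 : 0 ≤ bLen D (I[k]'hkn) := by unfold bLen; positivity
          have h3 : bLen D (I[k]'hkn) = 0 := le_antisymm h1 h2
          unfold bLen at h3
          simp only [List.getElem_map]
          exact List.length_eq_zero_iff.mp (by omega)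
        have hpop := PySem.List.pop?_natCast (I.map (fun i => PySem.List.pyGetD D i [])) k hklt
        rw [hmk] at hmino
        rw [aLoop_crop cap _ pos row hpos hbsne hbest (k : Int) hmino _ hpop,
          show pos + (cap - pos) = cap by ring, aLoop_stop _ _ _ _ (by omega)]
        rw [hk0]
        rw [PySem.List.slice_to _ (by omega : (0:Int) ≤ cap - pos)]
        simp only [List.take_nil, List.append_nil]
        rw [if_pos (by omega)]
      · rw [if_neg hd0]
        by_cases hfit : ((PySem.List.pyGetD D i []).length : Int) ≤ cap - pos
        · -- the pointer doc fits: it is exactly A's best-fit pick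
          rw [if_pos hfit]
          obtain ⟨J, K, hJK⟩ := List.append_of_mem hiI
          have hJlt : ∀ a ∈ J, a < i := by
            have := hJK ▸ hIpw
            rw [List.pairwise_append] at this
            exact fun a ha => this.2.2 a ha i (by simp)
          have hKgt : ∀ b ∈ K, i < b := by
            have := hJK ▸ hIpw
            rw [List.pairwise_append] at this
            exact fun b hb => (List.pairwise_cons.mp this.2.1).1 b hb
          have hsplit : I.map (fun i => PySem.List.pyGetD D i [])
              = J.map (fun i => PySem.List.pyGetD D i [])
                ++ PySem.List.pyGetD D i [] :: K.map (fun i => PySem.List.pyGetD D i []) := by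
            rw [hJK]; simp
          have hclassJK : ∀ j, j ∈ J ∨ j ∈ K → j ∈ sk ∨ j ∈ rest := by
            intro j hj
            have hjI : j ∈ I := by
              rw [hJK]
              rcases hj with h | h
              · exact List.mem_append.mpr (Or.inl h)
              · exact List.mem_append.mpr (Or.inr (by simp [h]))
            have hne : j ≠ i := by
              rcases hj with h | h
              · exact ne_of_lt (hJlt j h)
              · exact (ne_of_lt (hKgt j h)).symm
            have hmem := hperm.symm.mem_iff.mp hjI
            rcases List.mem_append.mp hmem with h | h
            · exact Or.inl h
            · rcases List.mem_cons.mp h with h | h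
              · exact absurd h hne
              · exact Or.inr h
          have hdpos : (0:Int) < ((PySem.List.pyGetD D i []).length : Int) := by
            have h1 : PySem.List.pyGetD D i [] ≠ [] := hd0
            have h2 : 0 < (PySem.List.pyGetD D i []).length := List.length_pos_iff.mpr h1
            omega
          have hbest : aBest (I.map (fun i => PySem.List.pyGetD D i [])) (cap - pos)
              = ((J.length : Int), ((PySem.List.pyGetD D i []).length : Int)) := by
            unfold aBest
            rw [hsplit]
            rw [aBestGo_pick (cap - pos) _ _ _ 0 (-1, 0) (by simpa using hdpos) hfit ?_ ?_]
            · simp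
            · intro x hx hxr
              obtain ⟨j, hjJ, hjx⟩ := List.mem_map.mp hx
              subst hjx
              rcases hclassJK j (Or.inl hjJ) with h | h
              · exact absurd hxr (by have := hsk j h; unfold bLen at this; omega)
              · rcases hihead j h with hlt | ⟨-, hgt⟩
                · unfold bLen at hlt; exact_mod_cast hlt
                · exact absurd (hJlt j hjJ) (by omega)
            · intro x hx hxr
              obtain ⟨j, hjK, hjx⟩ := List.mem_map.mp hx
              subst hjx
              rcases hclassJK j (Or.inr hjK) with h | h
              · exact absurd hxr (by have := hsk j h; unfold bLen at this; omega)
              · rcases hihead j h with hlt | ⟨heq, -⟩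
                · unfold bLen at hlt; omega
                · unfold bLen at heq; omega
          have hpop : PySem.List.pop? (I.map (fun i => PySem.List.pyGetD D i [])) ((J.length : Int))
              = some (PySem.List.pyGetD D i [],
                  (J ++ K).map (fun i => PySem.List.pyGetD D i [])) := by
            rw [hsplit]
            have := pop_at_append (J.map (fun i => PySem.List.pyGetD D i []))
              (PySem.List.pyGetD D i []) (K.map (fun i => PySem.List.pyGetD D i []))
            simpa using this
          rw [aLoop_take cap _ pos row hpos hbsne _ _ hbest (by omega) _ hpop]
          apply ih
          · refine ⟨J ++ K, ?_, ?_, by simp, ?_, hosr⟩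
            · refine List.Pairwise.sublist ?_ (hJK ▸ hIpw)
              exact List.Sublist.append_left (List.sublist_cons_self i K) J
            · have h1 : (i :: (sk ++ rest)).Perm (sk ++ i :: rest) := List.perm_middle.symm
              have h2 : (sk ++ i :: rest).Perm (J ++ i :: K) := hJK ▸ hperm
              have h3 : (J ++ i :: K).Perm (i :: (J ++ K)) := List.perm_middle
              exact ((h1.trans h2).trans h3).cons_inv
            · intro j hj
              have h1 := hsk j hj
              have h2 : (0:Int) ≤ ((PySem.List.pyGetD D i []).length : Int) := by positivity
              omega
          · simp only [List.length_append]
            push_cast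
            omega
          · show pos + ((PySem.List.pyGetD D i []).length : Int) ≤ cap
            omega
          · exact hcap
        · -- the pointer doc is longer than the gap: B just skips it, A's buffer is unchanged
          rw [if_neg hfit]
          apply ih
          · refine ⟨I, hIpw, ?_, rfl, ?_, hosr⟩
            · rw [List.append_assoc]
              simpa using hperm
            · intro j hj
              rcases List.mem_append.mp hj with h | h
              · exact hsk j h
              · rcases List.mem_cons.mp h with rfl | h
                · unfold bLen; omega
                · simp at h
          · exact hrow
          · exact hle
          · exact hcap

-- ===== VERDICT (by name: the statement is the Claim_ definition above) =====
theorem pack_row_py_spec : Claim_equal_pack_row_py := by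
  intro D cap _
  unfold Spec_pack_row_py pack_row_py pack_row_py_alt
  by_cases hcap : cap ≤ 0
  · rw [aLoop_stop cap D 0 [] (by omega), if_pos hcap]
    by_cases h0 : cap = 0
    · simp [h0]
    · rw [if_neg h0]
      simp only [List.length_nil]
      rw [if_pos (by omega)]
  · rw [if_neg hcap]
    have hlen : PySem.List.len D = (D.length : Int) := rfl
    have hinv : SimInv D cap
        (PySem.List.sorted2 (PySem.List.pyRange 0 D.length 1)
          (fun i => -(bLen D i)) (fun i => i)) [] D 0 := by
      refine ⟨PySem.List.pyRange 0 (D.length : Int) 1, ?_, ?_, ?_, by simp, ?_⟩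
      · rw [PySem.List.pyRange_zero_natCast]
        exact (List.pairwise_map).mpr (List.pairwise_lt_range.imp (by intro a b h; exact_mod_cast h))
      · simpa using PySem.List.sorted2_perm (PySem.List.pyRange 0 (D.length : Int) 1)
          (fun i => -(bLen D i)) (fun i => i) false
      · have := PySem.List.map_pyGetD_pyRange_zero D ([] : List Int)
        rw [hlen] at this
        exact this.symm
      · have hweak := sorted2_pairwise_lex D (PySem.List.pyRange 0 (D.length : Int) 1)
        have hnd : (PySem.List.sorted2 (PySem.List.pyRange 0 (D.length : Int) 1)
            (fun i => -(bLen D i)) (fun i => i) false).Nodup := by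
          refine (PySem.List.sorted2_perm _ _ _ _).nodup_iff.mpr ?_
          rw [PySem.List.pyRange_zero_natCast]
          exact (List.pairwise_map).mpr (List.pairwise_lt_range.imp
            (by intro a b h hc; omega))
        refine (hweak.and hnd).imp ?_
        intro a b ⟨h1, h2⟩
        rcases h1 with h | ⟨h3, h4⟩
        · exact Or.inl h
        · exact Or.inr ⟨h3, lt_of_le_of_ne h4 h2⟩
    have := sim D cap _ [] D 0 [] hinv (by simp) (by omega) (by omega)
    exact this
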